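-- pv_equiv track=rewrite | github.com/cburdine/aoc2020 | day_16/tickets2.py | match_field_values
-- ===== SOURCE A (Python) =====
-- def match_field_values(vals, ranges):
--     matched_ranges = set()
--     for i, r in enumerate(ranges):
--         matches = True
--         for val in vals:
--             if val not in range(*r[0]) and val not in range(*r[1]):
--                 matches = False
--                 break
--         if matches:
--             matched_ranges.add(i)
--
--     return matched_ranges
-- ===== SOURCE B (Python) =====
-- def match_field_values(vals, ranges):
--     candidates = set(range(len(ranges)))
--     for val in vals:
--         candidates &= {i for i, r in enumerate(ranges)
--                        if val in range(*r[0]) or val in range(*r[1])}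
--         if not candidates:
--             break
--     return candidates
-- ===== Notes on version B (the rewrite author's own statement) =====
-- stated objective: alternative
-- what changed: Swapped the loop nesting: instead of testing every value per range, B keeps a shrinking survivor set of range indices, intersecting it with the set of indices accepting each value and stopping early once it is empty.
import Mathlib
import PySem

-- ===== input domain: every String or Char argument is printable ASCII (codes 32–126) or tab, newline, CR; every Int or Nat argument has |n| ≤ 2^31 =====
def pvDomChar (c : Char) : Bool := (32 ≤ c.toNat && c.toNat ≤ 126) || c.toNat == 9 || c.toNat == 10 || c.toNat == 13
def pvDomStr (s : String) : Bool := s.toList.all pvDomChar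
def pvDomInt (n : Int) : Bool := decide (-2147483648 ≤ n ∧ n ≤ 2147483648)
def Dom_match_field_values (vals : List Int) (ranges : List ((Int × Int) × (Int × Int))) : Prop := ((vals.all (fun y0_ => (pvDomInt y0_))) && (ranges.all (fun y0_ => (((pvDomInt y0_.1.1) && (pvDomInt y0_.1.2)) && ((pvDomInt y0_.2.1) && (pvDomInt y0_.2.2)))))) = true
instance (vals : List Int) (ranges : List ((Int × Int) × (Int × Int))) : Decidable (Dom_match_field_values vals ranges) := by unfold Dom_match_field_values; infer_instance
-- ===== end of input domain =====

-- B swaps the loop nesting of A: it keeps a shrinking survivor set of range indices,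
-- intersecting it with the indices accepting each value (stopping early when empty),
-- instead of re-scanning all values for every range; same cost, different decomposition.


-- ===== PORT A =====
-- A's inner 'for val in vals' loop: sets matches = False and breaks at the first
-- val lying in neither subrange (val in range(a,b) is exact: a ≤ val < b, step 1).
def mfvMatches (vals : List Int) (r : (Int × Int) × (Int × Int)) : Bool :=
  match vals with
  | [] => true
  | v :: rest =>
    if !(decide (r.1.1 ≤ v ∧ v < r.1.2)) && !(decide (r.2.1 ≤ v ∧ v < r.2.2)) then false
    else mfvMatches rest r

def match_field_values (vals : List Int) (ranges : List ((Int × Int) × (Int × Int))) : List Int :=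
  (PySem.List.enumerate ranges).foldl
    (fun matched p => if mfvMatches vals p.2 then PySem.Set.add matched p.1 else matched)
    PySem.Set.empty

-- ===== PORT B =====
-- val in range(*r[0]) or val in range(*r[1])
def mfvAccepts (r : (Int × Int) × (Int × Int)) (v : Int) : Bool :=
  decide (r.1.1 ≤ v ∧ v < r.1.2) || decide (r.2.1 ≤ v ∧ v < r.2.2)

-- {i for i, r in enumerate(ranges) if val in range(*r[0]) or val in range(*r[1])}
-- (the generated indices are pairwise distinct, so the comprehension's set is this list)
def mfvAccepting (ranges : List ((Int × Int) × (Int × Int))) (v : Int) : List Int :=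
  (PySem.List.enumerate ranges).filterMap
    (fun p => if mfvAccepts p.2 v then some p.1 else none)

-- B's 'for val in vals' loop with the early break on an empty survivor set
def mfvLoop (ranges : List ((Int × Int) × (Int × Int))) (vals : List Int)
    (cands : PySem.Set Int) : PySem.Set Int :=
  match vals with
  | [] => cands
  | v :: rest =>
    let c := PySem.Set.inter cands (mfvAccepting ranges v)
    if c.isEmpty then c else mfvLoop ranges rest c

def match_field_values_alt (vals : List Int) (ranges : List ((Int × Int) × (Int × Int))) : List Int :=
  mfvLoop ranges vals (PySem.Set.ofList (PySem.List.pyRange 0 (ranges.length : Int) 1))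

-- ===== PRECONDITION & SPEC =====
def Spec_match_field_values (vals : List Int) (ranges : List ((Int × Int) × (Int × Int))) (out : List Int) : Prop := out = match_field_values_alt vals ranges
instance (vals : List Int) (ranges : List ((Int × Int) × (Int × Int))) (out : List Int) : Decidable (Spec_match_field_values vals ranges out) := by unfold Spec_match_field_values; infer_instance

-- ===== CLAIM (what is proved, stated in full; the proofs are below) =====
def Claim_equal_match_field_values : Prop := ∀ (vals : List Int) (ranges : List ((Int × Int) × (Int × Int))), Dom_match_field_values vals ranges → Spec_match_field_values vals ranges (match_field_values vals ranges)

-- ===== LEMMAS AND PROOFS =====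

-- A's early-exit inner loop is the 'all' of the acceptance test
theorem mfvMatches_eq_all (vals : List Int) (r : (Int × Int) × (Int × Int)) :
    mfvMatches vals r = vals.all (mfvAccepts r) := by
  induction vals with
  | nil => rfl
  | cons v rest ih =>
    simp only [mfvMatches, mfvAccepts, List.all_cons, ih]
    by_cases h1 : r.1.1 ≤ v ∧ v < r.1.2 <;> by_cases h2 : r.2.1 ≤ v ∧ v < r.2.2 <;>
      simp [h1, h2]

-- normal form of A's fold: the matching indices of the enumeration, in order
theorem foldl_add_eq_filterMap (vals : List Int) :
    ∀ (ranges : List ((Int × Int) × (Int × Int))) (s : Int) (acc : List Int),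
      (∀ x ∈ acc, x < s) →
      (PySem.List.enumerate ranges s).foldl
        (fun matched p => if mfvMatches vals p.2 then PySem.Set.add matched p.1 else matched) acc
      = acc ++ (PySem.List.enumerate ranges s).filterMap
          (fun p => if mfvMatches vals p.2 then some p.1 else none) := by
  intro ranges
  induction ranges with
  | nil => intro s acc _; simp [PySem.List.enumerate]
  | cons r rs ih =>
    intro s acc hacc
    rw [PySem.List.enumerate_cons]
    simp only [List.foldl_cons, List.filterMap_cons]
    by_cases hm : mfvMatches vals r = true
    · have hnotmem : s ∉ acc := fun hs => lt_irrefl s (hacc s hs)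
      have hadd : PySem.Set.add acc s = acc ++ [s] := by
        simp [PySem.Set.add, PySem.Set.contains, hnotmem]
      rw [if_pos hm, if_pos hm, hadd]
      rw [ih (s + 1) (acc ++ [s]) (by
        intro x hx
        rcases List.mem_append.1 hx with h | h
        · exact lt_trans (hacc x h) (by omega)
        · simp at h; omega)]
      simp
    · rw [if_neg hm, if_neg hm]
      rw [ih (s + 1) acc (fun x hx => lt_trans (hacc x hx) (by omega))]

-- normal form of B's loop: a filter of the survivor set by 'accepted by every value'
theorem mfvLoop_eq_filter (ranges : List ((Int × Int) × (Int × Int))) :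
    ∀ (vals : List Int) (cands : List Int),
      mfvLoop ranges vals cands
      = cands.filter (fun i => vals.all (fun v => (mfvAccepting ranges v).contains i)) := by
  intro vals
  induction vals with
  | nil => intro cands; simp [mfvLoop]
  | cons v rest ih =>
    intro cands
    simp only [mfvLoop]
    have hc : PySem.Set.inter cands (mfvAccepting ranges v)
        = cands.filter (fun i => (mfvAccepting ranges v).contains i) := rfl
    have hsplit : cands.filter (fun i => (v :: rest).all (fun w => (mfvAccepting ranges w).contains i))
        = (cands.filter (fun i => (mfvAccepting ranges v).contains i)).filter
            (fun i => rest.all (fun w => (mfvAccepting ranges w).contains i)) := by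
      rw [List.filter_filter]
      apply List.filter_congr
      intro i _
      simp [Bool.and_comm]
    by_cases he : (PySem.Set.inter cands (mfvAccepting ranges v)).isEmpty = true
    · rw [if_pos he]
      have : PySem.Set.inter cands (mfvAccepting ranges v) = [] := List.isEmpty_iff.1 he
      rw [hsplit, ← hc, this]
      rfl
    · rw [if_neg he, ih, hsplit, hc]

-- every index produced by the accepting-set comprehension is an index of the enumeration
theorem mem_mfvAccepting_mem_fst {ranges : List ((Int × Int) × (Int × Int))} {s v x : Int}
    (h : x ∈ (PySem.List.enumerate ranges s).filterMap
        (fun p => if mfvAccepts p.2 v then some p.1 else none)) :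
    x ∈ (PySem.List.enumerate ranges s).map (fun p => p.1) := by
  rcases List.mem_filterMap.1 h with ⟨p, hp, hsel⟩
  have hx : p.1 = x := by
    by_cases ha : mfvAccepts p.2 v = true
    · rw [if_pos ha] at hsel; exact Option.some.inj hsel
    · rw [if_neg ha] at hsel; cases hsel
  exact hx ▸ List.mem_map_of_mem hp

-- indices of an enumeration starting at s are ≥ s
theorem mem_fst_enumerate_le {α : Type} {ranges : List α} {s x : Int}
    (h : x ∈ (PySem.List.enumerate ranges s).map (fun p => p.1)) : s ≤ x := by
  rw [PySem.List.map_fst_enumerate] at h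
  exact (PySem.List.mem_pyRange_one.1 h).1

-- bridge: filtering the index list by 'contained in every per-value accepting set'
-- is the one-pass filterMap by 'accepted by every value'
theorem filter_contains_eq_filterMap (vals : List Int) :
    ∀ (ranges : List ((Int × Int) × (Int × Int))) (s : Int),
      ((PySem.List.enumerate ranges s).map (fun p => p.1)).filter
        (fun i => vals.all (fun v =>
          ((PySem.List.enumerate ranges s).filterMap
            (fun p => if mfvAccepts p.2 v then some p.1 else none)).contains i))
      = (PySem.List.enumerate ranges s).filterMap
          (fun p => if vals.all (mfvAccepts p.2) then some p.1 else none) := by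
  intro ranges
  induction ranges with
  | nil => intro s; simp [PySem.List.enumerate]
  | cons r rs ih =>
    intro s
    rw [PySem.List.enumerate_cons, List.map_cons, List.filter_cons]
    have hd : (vals.all fun v =>
        (((s, r) :: PySem.List.enumerate rs (s + 1)).filterMap
          (fun p => if mfvAccepts p.2 v then some p.1 else none)).contains s)
        = vals.all (mfvAccepts r) := by
      apply congrArg
      funext v
      rw [List.filterMap_cons]
      have hnot : s ∉ (PySem.List.enumerate rs (s + 1)).filterMap
          (fun p => if mfvAccepts p.2 v then some p.1 else none) := by
        intro hmem
        have := mem_fst_enumerate_le (mem_mfvAccepting_mem_fst hmem)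
        omega
      by_cases ha : mfvAccepts r v = true
      · simp [ha]
      · simp [ha, hnot]
    have htail :
        ((PySem.List.enumerate rs (s + 1)).map (fun p => p.1)).filter
          (fun i => vals.all (fun v =>
            (((s, r) :: PySem.List.enumerate rs (s + 1)).filterMap
              (fun p => if mfvAccepts p.2 v then some p.1 else none)).contains i))
        = (PySem.List.enumerate rs (s + 1)).filterMap
            (fun p => if vals.all (mfvAccepts p.2) then some p.1 else none) := by
      rw [List.filter_congr (fun i hi => ?_)]
      · exact ih (s + 1)
      · have hgt : s + 1 ≤ i := mem_fst_enumerate_le hi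
        apply congrArg
        funext v
        rw [List.filterMap_cons]
        by_cases ha : mfvAccepts r v = true
        · simp [ha, show ¬ (i = s) from by omega]
        · simp [ha]
    rw [htail, hd, List.filterMap_cons]
    by_cases hm : vals.all (mfvAccepts r) = true
    · rw [if_pos hm, if_pos hm]
    · rw [if_neg hm, if_neg hm]

-- ===== VERDICT (by name: the statement is the Claim_ definition above) =====
theorem match_field_values_spec : Claim_equal_match_field_values := by
  intro vals ranges _
  unfold Spec_match_field_values match_field_values match_field_values_alt
  simp only [PySem.Set.empty]
  rw [foldl_add_eq_filterMap vals ranges 0 [] (by intro x hx; cases hx)]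
  rw [mfvLoop_eq_filter]
  have hinit : PySem.Set.ofList (PySem.List.pyRange 0 (ranges.length : Int) 1)
      = (PySem.List.enumerate ranges 0).map (fun p => p.1) := by
    rw [PySem.List.map_fst_enumerate]
    simp [PySem.Set.ofList_eq_self_of_nodup _ (PySem.List.nodup_pyRange_one _ _)]
  rw [hinit]
  unfold mfvAccepting
  rw [filter_contains_eq_filterMap vals ranges 0]
  simp only [List.nil_append]
  apply List.filterMap_congr
  intro p _
  rw [mfvMatches_eq_all]
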